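-- pv_equiv track=rewrite | github.com/thisischeese/codingTest | goormlevel/49101/1. 환경과 쥐 크기의 상관관계/환경과 쥐 크기의 상관관계.py | cal_rep
-- ===== SOURCE A (Python) =====
-- def cal_rep(mydict,max_cnt,rep):
-- 	maxkey = int(max(mydict.keys()))
-- 	# 가능한 모든 x
-- 	for x in range(2,maxkey+1,1):
-- 		cnt=0
-- 		# 5개의 숫자 개수 세기 x-2부터 x+2까지
-- 		for size in range(x-2,x+3,1):
-- 			cnt+=mydict.get(size,0)
-- 		if max_cnt<cnt:
-- 			max_cnt = cnt
-- 			rep = x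
-- 	return rep
-- ===== SOURCE B (Python) =====
-- def cal_rep(mydict, max_cnt, rep):
--     maxkey = max(mydict.keys())
--     if maxkey < 2:
--         return rep
--     # the window sum over [x-2, x+2] only changes where a key enters (x = k-2)
--     # or leaves (x = k+3) the window, so only those x (plus the start x = 2)
--     # can ever strictly improve the running maximum
--     cands = {2}
--     for k in mydict:
--         for c in (k - 2, k + 3):
--             if 3 <= c <= maxkey:
--                 cands.add(c)
--     for x in sorted(cands):
--         cnt = (mydict.get(x - 2, 0) + mydict.get(x - 1, 0) + mydict.get(x, 0)
--                + mydict.get(x + 1, 0) + mydict.get(x + 2, 0))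
--         if cnt > max_cnt:
--             max_cnt = cnt
--             rep = x
--     return rep
-- ===== Notes on version B (the rewrite author's own statement) =====
-- stated objective: faster
-- what changed: Instead of scanning every x in [2, maxkey] with a 5-term inner loop, B collects the only positions where the window sum can change (x = k-2 or k+3 for each key k, plus x = 2), sorts them, and runs the running-max scan over just those candidates.
import Mathlib
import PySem

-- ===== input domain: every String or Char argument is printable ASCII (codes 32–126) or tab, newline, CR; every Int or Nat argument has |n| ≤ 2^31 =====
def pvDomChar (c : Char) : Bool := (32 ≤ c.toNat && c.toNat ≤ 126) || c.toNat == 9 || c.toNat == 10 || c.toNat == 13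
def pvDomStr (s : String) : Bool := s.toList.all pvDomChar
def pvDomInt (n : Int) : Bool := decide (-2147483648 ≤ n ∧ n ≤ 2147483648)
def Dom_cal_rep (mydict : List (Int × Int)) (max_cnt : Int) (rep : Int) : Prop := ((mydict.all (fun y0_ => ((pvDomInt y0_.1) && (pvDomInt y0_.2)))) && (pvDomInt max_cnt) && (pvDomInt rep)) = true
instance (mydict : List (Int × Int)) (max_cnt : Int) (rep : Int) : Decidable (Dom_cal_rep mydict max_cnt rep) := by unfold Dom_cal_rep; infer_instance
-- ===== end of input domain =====

-- B replaces A's scan over every x in [2, maxkey] by a scan over only the sorted candidate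
-- positions where the 5-wide window sum can change (x = k-2 or k+3 for a key k, plus x = 2).


-- ===== PORT A =====
def cal_rep (mydict : List (Int × Int)) (max_cnt : Int) (rep : Int) : Int :=
  let d := PySem.Dict.ofList mydict
  let maxkey := (PySem.List.max? d.keys (fun k => k)).getD 0   -- none only for an empty dict, excluded by Pre_
  ((PySem.List.pyRange 2 (maxkey + 1) 1).foldl
    (fun (s : Int × Int) x =>
      let cnt := (PySem.List.pyRange (x - 2) (x + 3) 1).foldl (fun c size => c + d.getD size 0) 0
      if s.1 < cnt then (cnt, x) else s)
    (max_cnt, rep)).2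

-- ===== PORT B =====
def pvWin (d : PySem.Dict Int Int) (x : Int) : Int :=
  d.getD (x - 2) 0 + d.getD (x - 1) 0 + d.getD x 0 + d.getD (x + 1) 0 + d.getD (x + 2) 0

def cal_rep_alt (mydict : List (Int × Int)) (max_cnt : Int) (rep : Int) : Int :=
  let d := PySem.Dict.ofList mydict
  let maxkey := (PySem.List.max? d.keys (fun k => k)).getD 0   -- none only for an empty dict, excluded by Pre_
  if maxkey < 2 then rep
  else
    let cands := d.keys.foldl
      (fun s k => [k - 2, k + 3].foldl
        (fun s c => if 3 ≤ c ∧ c ≤ maxkey then PySem.Set.add s c else s) s)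
      (PySem.Set.ofList [2])
    ((PySem.List.sorted cands (fun x => x) false).foldl
      (fun (s : Int × Int) x =>
        let cnt := pvWin d x
        if cnt > s.1 then (cnt, x) else s)
      (max_cnt, rep)).2

-- ===== PRECONDITION & SPEC =====
-- Pre_ excludes only the empty dict, on which Python A's max(mydict.keys()) raises ValueError.
def Pre_cal_rep (mydict : List (Int × Int)) (max_cnt : Int) (rep : Int) : Prop := mydict ≠ []
instance (mydict : List (Int × Int)) (max_cnt : Int) (rep : Int) : Decidable (Pre_cal_rep mydict max_cnt rep) := by unfold Pre_cal_rep; infer_instance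
def pvWitness_cal_rep : (List (Int × Int)) × Int × Int := ([(3, 2), (5, 1)], 0, 0)

def Spec_cal_rep (mydict : List (Int × Int)) (max_cnt : Int) (rep : Int) (out : Int) : Prop := out = cal_rep_alt mydict max_cnt rep
instance (mydict : List (Int × Int)) (max_cnt : Int) (rep : Int) (out : Int) : Decidable (Spec_cal_rep mydict max_cnt rep out) := by unfold Spec_cal_rep; infer_instance

-- ===== CLAIM (what is proved, stated in full; the proofs are below) =====
def Claim_equal_cal_rep : Prop := ∀ (mydict : List (Int × Int)) (max_cnt : Int) (rep : Int), Dom_cal_rep mydict max_cnt rep → Pre_cal_rep mydict max_cnt rep → Spec_cal_rep mydict max_cnt rep (cal_rep mydict max_cnt rep)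

-- ===== LEMMAS AND PROOFS =====

-- proof-only abbreviations: A's loop step, and the candidate predicate
def pvStep (d : PySem.Dict Int Int) (s : Int × Int) (x : Int) : Int × Int :=
  if s.1 < pvWin d x then (pvWin d x, x) else s

def pvCand (d : PySem.Dict Int Int) (x : Int) : Bool :=
  x == 2 || (decide (3 ≤ x) && (d.contains (x + 2) || d.contains (x - 3)))

-- A's inner 5-term loop computes the window sum
lemma pv_win_eq (d : PySem.Dict Int Int) (x : Int) :
    (PySem.List.pyRange (x - 2) (x + 3) 1).foldl (fun c size => c + d.getD size 0) 0 = pvWin d x := by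
  rw [PySem.List.pyRange_one_cons (by omega), PySem.List.pyRange_one_cons (by omega),
      PySem.List.pyRange_one_cons (by omega), PySem.List.pyRange_one_cons (by omega),
      PySem.List.pyRange_one_cons (by omega), PySem.List.pyRange_one_eq_nil (by omega)]
  simp only [List.foldl]
  have e4 : x - 2 + 1 + 1 + 1 + 1 = x + 2 := by ring
  have e3 : x - 2 + 1 + 1 + 1 = x + 1 := by ring
  have e2 : x - 2 + 1 + 1 = x := by ring
  have e1 : x - 2 + 1 = x - 1 := by ring
  rw [e4, e3, e2, e1, pvWin]
  omega

-- off the candidate set the window sum does not change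
lemma pv_win_stable (d : PySem.Dict Int Int) (x : Int) (h3 : 3 ≤ x)
    (hc : pvCand d x = false) : pvWin d x = pvWin d (x - 1) := by
  simp only [pvCand, Bool.or_eq_false_iff, Bool.and_eq_false_iff, beq_eq_false_iff_ne,
    decide_eq_false_iff_not] at hc
  obtain ⟨-, hb⟩ := hc
  rcases hb with h | h
  · omega
  · obtain ⟨hp, hm⟩ := h
    have z1 : d.getD (x + 2) 0 = 0 := by simp [PySem.Dict.getD_of_not_contains, hp]
    have z2 : d.getD (x - 3) 0 = 0 := by simp [PySem.Dict.getD_of_not_contains, hm]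
    simp only [pvWin]
    have e1 : x - 1 - 2 = x - 3 := by ring
    have e2 : x - 1 - 1 = x - 2 := by ring
    have e3 : x - 1 + 1 = x := by ring
    have e4 : x - 1 + 2 = x + 1 := by ring
    rw [e1, e2, e3, e4]
    omega

-- A's scan skips every non-candidate x
lemma pv_loop (d : PySem.Dict Int Int) (M : Int) :
    ∀ (n : Nat) (a : Int) (s : Int × Int), (M + 1 - a).toNat ≤ n → 2 ≤ a →
    (a = 2 ∨ pvWin d (a - 1) ≤ s.1) →
    (PySem.List.pyRange a (M + 1) 1).foldl (pvStep d) s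
      = ((PySem.List.pyRange a (M + 1) 1).filter (pvCand d)).foldl (pvStep d) s := by
  intro n
  induction n with
  | zero =>
    intro a s hn _ _
    rw [PySem.List.pyRange_one_eq_nil (by omega)]
    simp
  | succ n ih =>
    intro a s hn ha hinv
    by_cases hlt : a < M + 1
    · rw [PySem.List.pyRange_one_cons hlt]
      rcases hc : pvCand d a with hF | hT
      · -- not a candidate: step is a no-op and the filter drops a
        have ha3 : 3 ≤ a := by
          rcases (by omega : a = 2 ∨ 3 ≤ a) with h2 | h3
          · exfalso; rw [h2] at hc; simp [pvCand] at hc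
          · exact h3
        have hwin : pvWin d a ≤ s.1 := by
          rcases hinv with h2 | hle
          · omega
          · rw [pv_win_stable d a ha3 hc]; exact hle
        have hstep : pvStep d s a = s := by
          simp only [pvStep]; rw [if_neg (by omega)]
        simp only [List.filter_cons, hc, List.foldl_cons, hstep]
        exact ih (a + 1) s (by omega) (by omega)
          (Or.inr (by have e : a + 1 - 1 = a := by ring
                      rw [e]; exact hwin))
      · -- candidate: both sides take the step
        have hfst : pvWin d a ≤ (pvStep d s a).1 := by
          simp only [pvStep]
          split_ifs with h
          · simp
          · omega
        simp only [List.filter_cons, hc, List.foldl_cons]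
        exact ih (a + 1) (pvStep d s a) (by omega) (by omega)
          (Or.inr (by have e : a + 1 - 1 = a := by ring
                      rw [e]; exact hfst))
    · rw [PySem.List.pyRange_one_eq_nil (by omega)]
      simp

-- membership after one conditional set-add
lemma pv_mem_if_add (s : PySem.Set Int) (c x M : Int) :
    x ∈ (if 3 ≤ c ∧ c ≤ M then PySem.Set.add s c else s)
      ↔ x ∈ s ∨ (x = c ∧ 3 ≤ c ∧ c ≤ M) := by
  split_ifs with h
  · rw [PySem.Set.mem_add]
    constructor
    · rintro (h' | rfl)
      · tauto
      · exact Or.inr ⟨rfl, h⟩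
    · rintro (h' | ⟨rfl, -⟩)
      · tauto
      · exact Or.inr rfl
  · constructor
    · tauto
    · rintro (h' | ⟨rfl, h3, hM⟩)
      · exact h'
      · exact absurd ⟨h3, hM⟩ h

-- membership in B's candidate set
lemma pv_mem_cands (ks : List Int) (M : Int) (x : Int) : ∀ (s0 : PySem.Set Int),
    x ∈ ks.foldl
      (fun s k => [k - 2, k + 3].foldl
        (fun s c => if 3 ≤ c ∧ c ≤ M then PySem.Set.add s c else s) s) s0
    ↔ x ∈ s0 ∨ ∃ k ∈ ks, (x = k - 2 ∨ x = k + 3) ∧ 3 ≤ x ∧ x ≤ M := by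
  induction ks with
  | nil => simp
  | cons k ks ih =>
    intro s0
    rw [List.foldl_cons, ih]
    have hone : x ∈ [k - 2, k + 3].foldl
        (fun s c => if 3 ≤ c ∧ c ≤ M then PySem.Set.add s c else s) s0
        ↔ x ∈ s0 ∨ ((x = k - 2 ∨ x = k + 3) ∧ 3 ≤ x ∧ x ≤ M) := by
      rw [show ([k - 2, k + 3].foldl
            (fun s c => if 3 ≤ c ∧ c ≤ M then PySem.Set.add s c else s) s0)
          = (if 3 ≤ k + 3 ∧ k + 3 ≤ M then PySem.Set.add
              (if 3 ≤ k - 2 ∧ k - 2 ≤ M then PySem.Set.add s0 (k - 2) else s0) (k + 3)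
             else (if 3 ≤ k - 2 ∧ k - 2 ≤ M then PySem.Set.add s0 (k - 2) else s0)) from rfl,
          pv_mem_if_add, pv_mem_if_add]
      constructor
      · rintro ((h | ⟨rfl, h3, hM⟩) | ⟨rfl, h3, hM⟩)
        · tauto
        · exact Or.inr ⟨Or.inl rfl, h3, hM⟩
        · exact Or.inr ⟨Or.inr rfl, h3, hM⟩
      · rintro (h | ⟨rfl | rfl, h3, hM⟩)
        · tauto
        · exact Or.inl (Or.inr ⟨rfl, h3, hM⟩)
        · exact Or.inr ⟨rfl, h3, hM⟩
    rw [hone]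
    constructor
    · rintro ((h | h) | ⟨k', hk', hh⟩)
      · tauto
      · exact Or.inr ⟨k, List.mem_cons_self, h⟩
      · exact Or.inr ⟨k', List.mem_cons_of_mem _ hk', hh⟩
    · rintro (h | ⟨k', hk', hh⟩)
      · tauto
      · rcases List.mem_cons.mp hk' with rfl | hk'
        · exact Or.inl (Or.inr hh)
        · exact Or.inr ⟨k', hk', hh⟩

lemma pv_nodup_cands (ks : List Int) (M : Int) : ∀ (s0 : PySem.Set Int), s0.Nodup →
    (ks.foldl
      (fun s k => [k - 2, k + 3].foldl
        (fun s c => if 3 ≤ c ∧ c ≤ M then PySem.Set.add s c else s) s) s0).Nodup := by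
  induction ks with
  | nil => intro s0 h; simpa
  | cons k ks ih =>
    intro s0 h
    simp only [List.foldl_cons]
    apply ih
    simp only [List.foldl_nil]
    split_ifs <;> first
      | exact PySem.Set.nodup_add _ _ (PySem.Set.nodup_add _ _ h)
      | exact PySem.Set.nodup_add _ _ h
      | exact h

-- B's sorted candidate list is exactly A's range filtered to the candidates
lemma pv_sorted_cands (d : PySem.Dict Int Int) (M : Int) (h2 : 2 ≤ M) :
    PySem.List.sorted
      (d.keys.foldl
        (fun s k => [k - 2, k + 3].foldl
          (fun s c => if 3 ≤ c ∧ c ≤ M then PySem.Set.add s c else s) s)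
        (PySem.Set.ofList [2])) (fun x => x) false
    = (PySem.List.pyRange 2 (M + 1) 1).filter (pvCand d) := by
  apply PySem.List.sorted_eq_of_perm_of_pairwise_lt
  · rw [List.perm_ext_iff_of_nodup
      (List.Nodup.filter _ (PySem.List.nodup_pyRange_one _ _))
      (pv_nodup_cands _ _ _ (PySem.Set.nodup_ofList _))]
    intro x
    rw [List.mem_filter, PySem.List.mem_pyRange_one, pv_mem_cands]
    have hmem : x ∈ PySem.Set.ofList ([2] : List Int) ↔ x = 2 := by
      rw [PySem.Set.mem_ofList]; simp
    rw [hmem]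
    simp only [pvCand, Bool.or_eq_true, Bool.and_eq_true, beq_iff_eq, decide_eq_true_eq,
      PySem.Dict.contains_iff_mem_keys]
    constructor
    · rintro ⟨⟨hlo, hhi⟩, h | ⟨h3, hk | hk⟩⟩
      · exact Or.inl h
      · exact Or.inr ⟨x + 2, hk, Or.inl (by ring), h3, by omega⟩
      · exact Or.inr ⟨x - 3, hk, Or.inr (by ring), h3, by omega⟩
    · rintro (rfl | ⟨k, hk, rfl | rfl, h3, hM⟩)
      · exact ⟨⟨le_refl _, by omega⟩, Or.inl rfl⟩
      · exact ⟨⟨by omega, by omega⟩, Or.inr ⟨h3, Or.inl (by rwa [show k - 2 + 2 = k from by ring])⟩⟩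
      · exact ⟨⟨by omega, by omega⟩, Or.inr ⟨h3, Or.inr (by rwa [show k + 3 - 3 = k from by ring])⟩⟩
  · exact List.Pairwise.filter _ (PySem.List.pairwise_lt_pyRange_one _ _)

-- the two ports agree on every input
lemma pv_main (mydict : List (Int × Int)) (max_cnt : Int) (rep : Int) :
    cal_rep mydict max_cnt rep = cal_rep_alt mydict max_cnt rep := by
  simp only [cal_rep, cal_rep_alt]
  set d := PySem.Dict.ofList mydict with hd
  set M := (PySem.List.max? d.keys (fun k => k)).getD 0 with hM
  by_cases h : M < 2
  · rw [if_pos h, PySem.List.pyRange_one_eq_nil (by omega)]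
    simp
  · rw [if_neg h]
    have hA : (fun (s : Int × Int) x =>
        let cnt := (PySem.List.pyRange (x - 2) (x + 3) 1).foldl (fun c size => c + d.getD size 0) 0
        if s.1 < cnt then (cnt, x) else s) = pvStep d := by
      funext s x
      simp only [pvStep, pv_win_eq]
    have hB : (fun (s : Int × Int) x =>
        let cnt := pvWin d x
        if cnt > s.1 then (cnt, x) else s) = pvStep d := rfl
    rw [hA, hB, pv_sorted_cands d M (by omega),
      pv_loop d M ((M + 1 - 2).toNat) 2 (max_cnt, rep) (by omega) (by omega) (Or.inl rfl)]

-- ===== VERDICT (by name: the statement is the Claim_ definition above) =====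
theorem cal_rep_spec : Claim_equal_cal_rep := by
  intro mydict max_cnt rep _ _
  unfold Spec_cal_rep
  exact pv_main mydict max_cnt rep
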